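-- pv_equiv track=rewrite | github.com/RawitSHIE/Algorithms-Training-Python | OTP.py | compat_6
-- ===== SOURCE A (Python) =====
-- def compat_6(text):
--     """6 len"""
--     lst = []
--     for i in "0123456789":
--         if i in text:
--             lst += [str(text.count(i))]
--     if lst.count("3") == 1 and lst.count("2") == 0 and lst.count("1") == 3 and len(lst) == 4:
--         return "Valid"
--     elif lst.count("2") == 2 and lst.count("1") == 2 and len(lst) == 4:
--         return "Valid"
--     else:
--         return "Invalid"
-- ===== SOURCE B (Python) =====
-- def compat_6(text):
--     freq = {}
--     for ch in text:
--         if ch in "0123456789":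
--             freq[ch] = freq.get(ch, 0) + 1
--     return "Valid" if sorted(freq.values()) in ([1, 1, 1, 3], [1, 1, 2, 2]) else "Invalid"
-- ===== Notes on version B (the rewrite author's own statement) =====
-- stated objective: simpler
-- what changed: Replaces the 10 per-digit count-scans plus string-encoded count-of-counts bookkeeping with one frequency-dict pass over the text and a comparison of the sorted value multiset against [1,1,1,3]/[1,1,2,2].
import Mathlib
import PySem

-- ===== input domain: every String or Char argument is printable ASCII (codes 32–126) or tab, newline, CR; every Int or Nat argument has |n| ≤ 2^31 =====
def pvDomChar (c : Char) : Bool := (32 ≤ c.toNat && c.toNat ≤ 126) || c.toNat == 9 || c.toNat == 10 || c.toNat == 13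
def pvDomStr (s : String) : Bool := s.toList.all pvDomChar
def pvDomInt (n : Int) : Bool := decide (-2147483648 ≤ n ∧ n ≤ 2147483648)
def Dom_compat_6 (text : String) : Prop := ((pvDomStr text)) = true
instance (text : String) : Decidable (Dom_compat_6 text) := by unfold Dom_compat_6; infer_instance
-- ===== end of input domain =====

-- B replaces A's 10 per-digit count-scans and string-typed count-of-counts bookkeeping by one
-- frequency-dict pass over the text plus a sorted-value-multiset comparison (objective: simpler).

-- ===== PORT A =====
def compat_6 (text : String) : String :=
  let lst : List String :=
    ("0123456789".toList).foldl
      (fun lst i =>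
        if PySem.Str.isIn (String.ofList [i]) text then
          lst ++ [PySem.Int.toStr ((PySem.Str.count text (String.ofList [i]) : Nat) : Int)]
        else lst) []
  if lst.count "3" = 1 ∧ lst.count "2" = 0 ∧ lst.count "1" = 3 ∧ lst.length = 4 then "Valid"
  else if lst.count "2" = 2 ∧ lst.count "1" = 2 ∧ lst.length = 4 then "Valid"
  else "Invalid"

-- ===== PORT B =====
def compat_6_alt (text : String) : String :=
  let freq : PySem.Dict Char Int :=
    text.toList.foldl
      (fun d ch => if ch ∈ "0123456789".toList then d.insert ch (d.getD ch 0 + 1) else d)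
      PySem.Dict.empty
  let vals : List Int := PySem.List.sorted (PySem.Dict.values freq) (fun x => x) false
  if vals = [1, 1, 1, 3] ∨ vals = [1, 1, 2, 2] then "Valid" else "Invalid"

-- ===== PRECONDITION & SPEC =====
def Spec_compat_6 (text : String) (out : String) : Prop := out = compat_6_alt text
instance (text : String) (out : String) : Decidable (Spec_compat_6 text out) := by unfold Spec_compat_6; infer_instance

-- ===== CLAIM (what is proved, stated in full; the proofs are below) =====
def Claim_equal_compat_6 : Prop := ∀ (text : String), Dom_compat_6 text → Spec_compat_6 text (compat_6 text)

-- ===== LEMMAS AND PROOFS =====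

theorem infix_singleton {α : Type} (a : α) (l : List α) : [a] <:+: l ↔ a ∈ l := by
  constructor
  · intro h; exact List.singleton_sublist.mp h.sublist
  · intro h
    obtain ⟨s, t, rfl⟩ := List.append_of_mem h
    exact ⟨s, t, by simp⟩

theorem chars_isIn_singleton (i : Char) (l : List Char) :
    PySem.Chars.isIn [i] l = true ↔ i ∈ l := by
  rw [PySem.Chars.isIn_iff_infix]; exact infix_singleton i l

theorem go_singleton (i : Char) : ∀ (fuel : Nat) (l : List Char) (acc : Nat),
    l.length ≤ fuel → PySem.Chars.count.go [i] fuel l acc = acc + l.count i := by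
  intro fuel
  induction fuel with
  | zero =>
    intro l acc h
    have hl : l = [] := List.length_eq_zero_iff.mp (Nat.le_zero.mp h)
    subst hl; simp [PySem.Chars.count.go]
  | succ f ih =>
    intro l acc h
    cases l with
    | nil => simp [PySem.Chars.count.go]
    | cons hd t =>
      simp only [PySem.Chars.count.go]
      by_cases hh : i = hd
      · subst hh
        simp only [List.isPrefixOf, Bool.and_true, beq_self_eq_true, if_pos]
        rw [ih _ _ (by simpa using h)]
        simp
        omega
      · have hpf : List.isPrefixOf [i] (hd :: t) = false := by
          simp [List.isPrefixOf, hh]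
        rw [hpf]
        simp only [Bool.false_eq_true, if_false]
        rw [ih _ _ (by simpa using Nat.le_of_succ_le_succ (by simpa using h))]
        simp [List.count_cons]
        intro h'; exact absurd h'.symm hh

theorem count_singleton (s : String) (i : Char) :
    PySem.Str.count s (String.ofList [i]) = s.toList.count i := by
  rw [PySem.Str.count_eq]
  simp only [String.toList_ofList]
  rw [PySem.Chars.count]
  rw [show (List.isEmpty [i]) = false from rfl]
  simp only [Bool.false_eq_true, if_false]
  rw [go_singleton i s.toList.length s.toList 0 le_rfl]; simp

theorem toDigitsCore_ge (b : Nat) : ∀ (f n : Nat) (l : List Char), 1 ≤ f →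
    l.length + 1 ≤ (Nat.toDigitsCore b f n l).length := by
  intro f
  induction f with
  | zero => intro n l h; omega
  | succ f ih =>
    intro n l _
    rw [Nat.toDigitsCore]
    by_cases hb : n / b = 0
    · simp [hb]
    · simp only [hb, if_false]
      rcases Nat.eq_zero_or_pos f with hf | hf
      · subst hf; rw [Nat.toDigitsCore]; simp
      · have := ih (n / b) (Nat.digitChar (n % b) :: l) hf
        simp at this ⊢
        omega

theorem toDigits_ne_nil (m : Nat) : Nat.toDigits 10 m ≠ [] := by
  have := toDigitsCore_ge 10 (m + 1) m [] (by omega)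
  intro h; rw [Nat.toDigits] at h; rw [h] at this; simp at this

theorem toDigits_small (m : Nat) (h : m < 10) : Nat.toDigits 10 m = [Nat.digitChar m] := by
  rw [Nat.toDigits, Nat.toDigitsCore]
  simp [Nat.div_eq_of_lt h, Nat.mod_eq_of_lt h]

theorem toDigits_big (m : Nat) (h : 10 ≤ m) : 2 ≤ (Nat.toDigits 10 m).length := by
  rw [Nat.toDigits, Nat.toDigitsCore]
  have hb : ¬ (m / 10 = 0) := by
    have := Nat.div_le_div_right (c := 10) h
    simp at this; omega
  simp only [hb, if_false]
  have := toDigitsCore_ge 10 m (m / 10) [Nat.digitChar (m % 10)] (by omega)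
  simpa using this

theorem toStr_eq_digit (n : Int) (k : Nat) (hk1 : 1 ≤ k) (hk : k < 10) :
    PySem.Int.toStr n = PySem.Int.toStr (k : Int) ↔ n = (k : Int) := by
  constructor
  · intro h
    have h' : PySem.Int.toChars n = PySem.Int.toChars (k : Int) := by
      rw [← PySem.Int.toList_toStr, ← PySem.Int.toList_toStr, h]
    rw [PySem.Int.toChars, PySem.Int.toChars] at h'
    rw [if_neg (by omega : ¬ ((k : Int) < 0))] at h'
    have hkt : ((k : Int)).toNat = k := by omega
    rw [hkt, toDigits_small k hk] at h'
    by_cases hn : n < 0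
    · rw [if_pos hn] at h'
      have hlen := congrArg List.length h'
      simp at hlen
      exact absurd hlen (toDigits_ne_nil _)
    · rw [if_neg hn] at h'
      by_cases hbig : 10 ≤ n.toNat
      · have := toDigits_big n.toNat hbig
        rw [h'] at this; simp at this
      · rw [toDigits_small n.toNat (by omega)] at h'
        simp at h'
        have : n.toNat = k := by
          have h10 : n.toNat < 10 := by omega
          set m := n.toNat with hm
          interval_cases m <;> interval_cases k <;> first | rfl | (exact absurd h' (by decide))
        omega
  · intro h; rw [h]

theorem counts_le (a b : Int) (hab : a ≠ b) : ∀ l : List Int,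
    l.count a + l.count b ≤ l.length := by
  intro l
  induction l with
  | nil => simp
  | cons hd t ih =>
    simp only [List.count_cons, List.length_cons]
    by_cases h1 : hd = a
    · subst h1; simp [hab]; omega
    · by_cases h2 : hd = b
      · subst h2; simp [Ne.symm hab]; omega
      · simp [h1, h2]; omega

theorem mem_of_counts (a b : Int) : ∀ (l : List Int), a ≠ b →
    l.count a + l.count b = l.length → ∀ x ∈ l, x = a ∨ x = b := by
  intro l hab
  induction l with
  | nil => intro _ x hx; simp at hx
  | cons hd t ih =>
    intro h x hx
    have hsum := counts_le a b hab t
    have hd_ab : hd = a ∨ hd = b := by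
      by_contra hc
      push_neg at hc
      simp only [List.count_cons, List.length_cons] at h
      rw [show (hd == a) = false by simp [hc.1], show (hd == b) = false by simp [hc.2]] at h
      simp at h; omega
    have ht : t.count a + t.count b = t.length := by
      simp only [List.count_cons, List.length_cons] at h
      rcases hd_ab with rfl | rfl
      · simp [hab] at h; omega
      · simp [Ne.symm hab] at h; omega
    rcases List.mem_cons.mp hx with rfl | hxt
    · exact hd_ab
    · exact ih ht x hxt

theorem count_none (a : Int) (l : List Int) (h : a ∉ l) : l.count a = 0 :=
  List.count_eq_zero.mpr h

theorem perm_1113 (V : List Int) (h3 : V.count 3 = 1) (h2 : V.count 2 = 0)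
    (h1 : V.count 1 = 3) (hl : V.length = 4) : V.Perm [1, 1, 1, 3] := by
  rw [List.perm_iff_count]
  intro a
  have hmem := mem_of_counts 1 3 V (by decide) (by omega)
  by_cases ha1 : a = 1
  · subst ha1; rw [h1]; decide
  · by_cases ha3 : a = 3
    · subst ha3; rw [h3]; decide
    · have hz : V.count a = 0 :=
        count_none a V (fun hm => by rcases hmem a hm with rfl | rfl <;> simp_all)
      have hz2 : List.count a [(1:Int), 1, 1, 3] = 0 := by
        apply count_none; intro hm; simp at hm; tauto
      rw [hz, hz2]

theorem perm_1122 (V : List Int) (h2 : V.count 2 = 2) (h1 : V.count 1 = 2)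
    (hl : V.length = 4) : V.Perm [1, 1, 2, 2] := by
  rw [List.perm_iff_count]
  intro a
  have hmem := mem_of_counts 1 2 V (by decide) (by omega)
  by_cases ha1 : a = 1
  · subst ha1; rw [h1]; decide
  · by_cases ha2 : a = 2
    · subst ha2; rw [h2]; decide
    · have hz : V.count a = 0 :=
        count_none a V (fun hm => by rcases hmem a hm with rfl | rfl <;> simp_all)
      have hz2 : List.count a [(1:Int), 1, 2, 2] = 0 := by
        apply count_none; intro hm; simp at hm; tauto
      rw [hz, hz2]

theorem cond1_iff (V : List Int) :
    (V.count 3 = 1 ∧ V.count 2 = 0 ∧ V.count 1 = 3 ∧ V.length = 4) ↔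
      PySem.List.sorted V (fun x => x) false = [1, 1, 1, 3] := by
  constructor
  · rintro ⟨h3, h2, h1, hl⟩
    exact PySem.List.sorted_id_eq_of_perm_of_pairwise (xs := V) (ys := [1, 1, 1, 3])
      (perm_1113 V h3 h2 h1 hl).symm (by decide)
  · intro hs
    have hp : V.Perm [1, 1, 1, 3] := by
      have hq := PySem.List.sorted_perm V (fun x => x) false
      rw [hs] at hq
      exact hq.symm
    refine ⟨?_, ?_, ?_, ?_⟩
    · rw [hp.count_eq]; decide
    · rw [hp.count_eq]; decide
    · rw [hp.count_eq]; decide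
    · rw [hp.length_eq]; decide

theorem cond2_iff (V : List Int) :
    (V.count 2 = 2 ∧ V.count 1 = 2 ∧ V.length = 4) ↔
      PySem.List.sorted V (fun x => x) false = [1, 1, 2, 2] := by
  constructor
  · rintro ⟨h2, h1, hl⟩
    exact PySem.List.sorted_id_eq_of_perm_of_pairwise (xs := V) (ys := [1, 1, 2, 2])
      (perm_1122 V h2 h1 hl).symm (by decide)
  · intro hs
    have hp : V.Perm [1, 1, 2, 2] := by
      have hq := PySem.List.sorted_perm V (fun x => x) false
      rw [hs] at hq
      exact hq.symm
    refine ⟨?_, ?_, ?_⟩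
    · rw [hp.count_eq]; decide
    · rw [hp.count_eq]; decide
    · rw [hp.length_eq]; decide


theorem foldl_filter_prop {α β : Type} (p : α → Prop) [DecidablePred p] (f : β → α → β) :
    ∀ (l : List α) (x : β),
      l.foldl (fun acc a => if p a then f acc a else acc) x
        = (l.filter (fun a => decide (p a))).foldl f x := by
  intro l
  induction l with
  | nil => intro x; rfl
  | cons hd t ih =>
    intro x
    by_cases h : p hd <;> simp [h, ih]

theorem count_toStr (V : List Int) (k : Nat) (h1 : 1 ≤ k) (h9 : k < 10) :
    (V.map PySem.Int.toStr).count (PySem.Int.toStr (k : Int)) = V.count ((k : Nat) : Int) := by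
  rw [List.count_eq_countP, List.count_eq_countP, List.countP_map]
  apply List.countP_congr
  intro x _
  simp only [Function.comp_apply, beq_iff_eq]
  exact_mod_cast toStr_eq_digit x k h1 h9

theorem compat6_main (text : String) : compat_6 text = compat_6_alt text := by
  have hK : ("0123456789".toList).filter (fun i => PySem.Str.isIn (String.ofList [i]) text)
      = ("0123456789".toList).filter (fun i => decide (i ∈ text.toList)) := by
    apply List.filter_congr
    intro x _
    rw [Bool.eq_iff_iff]
    simp [chars_isIn_singleton]
  have hlst : (("0123456789".toList).foldl
      (fun lst i => if PySem.Str.isIn (String.ofList [i]) text then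
          lst ++ [PySem.Int.toStr ((PySem.Str.count text (String.ofList [i]) : Nat) : Int)]
        else lst) ([] : List String))
      = ((("0123456789".toList).filter (fun i => decide (i ∈ text.toList))).map
          (fun i => ((text.toList.count i : Nat) : Int))).map PySem.Int.toStr := by
    rw [PySem.List.foldl_append_if
      (p := fun i => PySem.Str.isIn (String.ofList [i]) text)
      (f := fun i => PySem.Int.toStr ((PySem.Str.count text (String.ofList [i]) : Nat) : Int))]
    rw [hK, List.map_map]
    simp only [List.nil_append]
    apply List.map_congr_left
    intro a _
    simp only [Function.comp_apply]
    rw [count_singleton]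
  have hds : text.toList.foldl
        (fun d ch => if ch ∈ "0123456789".toList then d.insert ch (d.getD ch 0 + 1) else d)
        (PySem.Dict.empty : PySem.Dict Char Int)
      = PySem.Dict.counter (text.toList.filter (fun ch => decide (ch ∈ "0123456789".toList))) := by
    rw [foldl_filter_prop (p := fun ch => ch ∈ "0123456789".toList)
        (f := fun (d : PySem.Dict Char Int) (ch : Char) => d.insert ch (d.getD ch 0 + 1))]
    rw [PySem.Dict.foldl_insert_getD_add_one_eq_counter]
  set ds := text.toList.filter (fun ch => decide (ch ∈ "0123456789".toList)) with hds0
  have hvals : (PySem.Dict.counter ds).values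
      = (PySem.Set.ofList ds).map (fun k => ((ds.count k : Nat) : Int)) := by
    have hit := PySem.Dict.items_counter (xs := ds)
    simp only [PySem.Dict.values, hit, List.map_map]
    rfl
  have hcnt : (PySem.Set.ofList ds).map (fun k => ((ds.count k : Nat) : Int))
      = (PySem.Set.ofList ds).map (fun k => ((text.toList.count k : Nat) : Int)) := by
    apply List.map_congr_left
    intro a ha
    have ha2 : a ∈ ds := (PySem.Set.mem_ofList ds a).mp ha
    have hm := (List.mem_filter.mp ha2).2
    rw [hds0]
    exact congrArg (fun n : Nat => (n : Int))
      (List.count_filter (p := fun ch => decide (ch ∈ "0123456789".toList))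
        (a := a) (l := text.toList) hm)
  have hperm : ((PySem.Set.ofList ds).map (fun k => ((text.toList.count k : Nat) : Int))).Perm
      ((("0123456789".toList).filter (fun i => decide (i ∈ text.toList))).map
        (fun i => ((text.toList.count i : Nat) : Int))) := by
    apply List.Perm.map
    rw [List.perm_ext_iff_of_nodup (PySem.Set.nodup_ofList ds)
      (List.Nodup.filter _ (by decide))]
    intro a
    rw [PySem.Set.mem_ofList, hds0]
    simp only [List.mem_filter, decide_eq_true_eq]
    tauto
  have hsort := PySem.List.sorted_eq_sorted_of_perm _ _ (fun x : Int => x)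
    (fun a b h => h) hperm
  simp only [compat_6, compat_6_alt]
  rw [hlst, hds, hvals, hcnt, hsort]
  set Vc := (("0123456789".toList).filter (fun i => decide (i ∈ text.toList))).map
      (fun i => ((text.toList.count i : Nat) : Int)) with hVc
  have e3 : ("3" : String) = PySem.Int.toStr ((3 : Nat) : Int) := by decide
  have e2 : ("2" : String) = PySem.Int.toStr ((2 : Nat) : Int) := by decide
  have e1 : ("1" : String) = PySem.Int.toStr ((1 : Nat) : Int) := by decide
  rw [e3, e2, e1, count_toStr Vc 3 (by omega) (by omega),
      count_toStr Vc 2 (by omega) (by omega), count_toStr Vc 1 (by omega) (by omega)]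
  simp only [List.length_map, Nat.cast_ofNat, Nat.cast_one]
  by_cases hc1 : Vc.count 3 = 1 ∧ Vc.count 2 = 0 ∧ Vc.count 1 = 3 ∧ Vc.length = 4
  · rw [if_pos hc1, if_pos (Or.inl ((cond1_iff Vc).mp hc1))]
  · rw [if_neg hc1]
    by_cases hc2 : Vc.count 2 = 2 ∧ Vc.count 1 = 2 ∧ Vc.length = 4
    · rw [if_pos hc2, if_pos (Or.inr ((cond2_iff Vc).mp hc2))]
    · rw [if_neg hc2, if_neg ?_]
      intro h
      rcases h with h | h
      · exact hc1 ((cond1_iff Vc).mpr h)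
      · exact hc2 ((cond2_iff Vc).mpr h)

-- ===== VERDICT (by name: the statement is the Claim_ definition above) =====
theorem compat_6_spec : Claim_equal_compat_6 := by
  intro text _
  unfold Spec_compat_6
  exact compat6_main text
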